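-- pv_equiv track=rewrite | github.com/alancalvitti/PythonFunctionalDataUtilities | data_utilities.py | numberlist
-- ===== SOURCE A (Python) =====
-- def numberlist(nums, limit):
--     def f(nums, limit):
--         sum = 0
--         for x in nums:
--             sum += x
--             yield x
--             if sum > limit:
--                 return
--
--     return list(f(nums,limit))
-- ===== SOURCE B (Python) =====
-- def numberlist(nums, limit):
--     xs = list(nums)
--     if not xs:
--         return []
--
--     def go(lo, hi, budget):
--         # for the nonempty segment xs[lo:hi] with remaining budget:
--         # returns (number of elements taken, whether the process stopped)
--         if hi - lo == 1:
--             return 1, xs[lo] > budget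
--         mid = (lo + hi) // 2
--         k_left, stopped = go(lo, mid, budget)
--         if stopped:
--             return k_left, True
--         k_right, stopped = go(mid, hi, budget - sum(xs[lo:mid]))
--         return k_left + k_right, stopped
--
--     k, _ = go(0, len(xs), limit)
--     return xs[:k]
-- ===== Notes on version B (the rewrite author's own statement) =====
-- stated objective: alternative
-- what changed: Replaces the streaming generator (running sum, early return) by a divide-and-conquer recursion on halves of the list that computes a (count taken, stopped) pair per segment, combining the right half under the budget reduced by the left half's sum, then slices once.
import Mathlib
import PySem

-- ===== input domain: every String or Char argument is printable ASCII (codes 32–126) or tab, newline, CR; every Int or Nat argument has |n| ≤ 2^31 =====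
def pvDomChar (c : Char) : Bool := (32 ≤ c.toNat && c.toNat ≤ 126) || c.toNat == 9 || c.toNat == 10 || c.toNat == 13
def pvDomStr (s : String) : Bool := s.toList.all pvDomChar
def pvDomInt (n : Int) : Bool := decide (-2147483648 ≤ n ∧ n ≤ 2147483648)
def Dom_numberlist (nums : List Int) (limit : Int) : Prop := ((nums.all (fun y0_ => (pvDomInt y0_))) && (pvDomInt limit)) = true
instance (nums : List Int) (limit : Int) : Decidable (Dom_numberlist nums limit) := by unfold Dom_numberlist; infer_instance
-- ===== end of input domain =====

-- B replaces A's streaming generator by a divide-and-conquer recursion on halves computing (count taken, stopped) pairs; objective: alternative.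


-- ===== PORT A =====
-- generator f: running sum, yield x, stop after sum exceeds limit
def numberlistGen (nums : List Int) (limit : Int) (sum : Int) : List Int :=
  match nums with
  | [] => []
  | x :: rest =>
      let sum' := sum + x
      x :: (if sum' > limit then [] else numberlistGen rest limit sum')

def numberlist (nums : List Int) (limit : Int) : List Int :=
  numberlistGen nums limit 0

-- ===== PORT B =====
-- go: for a nonempty segment with remaining budget, (number of elements taken, stopped?);
-- segments xs[lo:hi] are represented by the sublist itself, the split at mid is take/drop at length/2;
-- fuel (= initial length) only makes the halving recursion structural, it is never exhausted
def goB (fuel : Nat) (xs : List Int) (budget : Int) : Nat × Bool :=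
  match fuel with
  | 0 => (0, false)
  | fuel' + 1 =>
    if xs.length ≤ 1 then
      match xs with
      | [] => (0, false)
      | x :: _ => (1, decide (x > budget))
    else
      let L := xs.take (xs.length / 2)
      let R := xs.drop (xs.length / 2)
      let p := goB fuel' L budget
      if p.2 then (p.1, true)
      else
        let q := goB fuel' R (budget - L.sum)
        (p.1 + q.1, q.2)

def numberlist_alt (nums : List Int) (limit : Int) : List Int :=
  if nums.isEmpty then []
  else nums.take (goB nums.length nums limit).1

-- ===== PRECONDITION & SPEC =====
def Spec_numberlist (nums : List Int) (limit : Int) (out : List Int) : Prop := out = numberlist_alt nums limit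
instance (nums : List Int) (limit : Int) (out : List Int) : Decidable (Spec_numberlist nums limit out) := by unfold Spec_numberlist; infer_instance

-- ===== CLAIM (what is proved, stated in full; the proofs are below) =====
def Claim_equal_numberlist : Prop := ∀ (nums : List Int) (limit : Int), Dom_numberlist nums limit → Spec_numberlist nums limit (numberlist nums limit)

-- ===== LEMMAS AND PROOFS =====
-- reference linear process: (count taken, stopped?) with remaining budget
def lin : List Int → Int → Nat × Bool
  | [], _ => (0, false)
  | x :: r, b => if x > b then (1, true) else ((lin r (b - x)).1 + 1, (lin r (b - x)).2)

lemma lin_append (L R : List Int) (b : Int) :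
    lin (L ++ R) b =
      if (lin L b).2 then lin L b
      else ((lin L b).1 + (lin R (b - L.sum)).1, (lin R (b - L.sum)).2) := by
  induction L generalizing b with
  | nil => simp [lin]
  | cons x L ih =>
    by_cases hx : x > b
    · simp [lin, hx]
    · simp only [List.cons_append, lin, if_neg hx, List.sum_cons]
      rw [ih (b - x)]
      have : b - x - L.sum = b - (x + L.sum) := by ring
      rw [this]
      by_cases hs : (lin L (b - x)).2
      · simp [hs]
      · simp [hs]; omega

lemma goB_eq_lin (fuel : Nat) (xs : List Int) (b : Int) (hf : xs.length ≤ fuel) :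
    goB fuel xs b = lin xs b := by
  induction fuel generalizing xs b with
  | zero =>
    have : xs = [] := List.eq_nil_of_length_eq_zero (by omega)
    subst this; simp [goB, lin]
  | succ fuel ih =>
    by_cases h1 : xs.length ≤ 1
    · match xs with
      | [] => simp [goB, lin]
      | [x] =>
        simp only [goB, lin, List.length_cons, List.length_nil]
        by_cases hx : x > b <;> simp [hx]
      | x :: y :: t => simp at h1
    · simp only [goB, if_neg h1]
      have hL : (xs.take (xs.length / 2)).length ≤ fuel := by
        simp only [List.length_take]; omega
      have hR : (xs.drop (xs.length / 2)).length ≤ fuel := by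
        simp only [List.length_drop]; omega
      rw [ih _ b hL, ih _ (b - (xs.take (xs.length / 2)).sum) hR]
      conv_rhs => rw [← List.take_append_drop (xs.length / 2) xs]
      rw [lin_append]
      by_cases hp : (lin (xs.take (xs.length / 2)) b).2
      · simp [Prod.ext_iff, hp]
      · simp [hp]

lemma gen_eq_take_lin (xs : List Int) (limit acc : Int) :
    numberlistGen xs limit acc = xs.take (lin xs (limit - acc)).1 := by
  induction xs generalizing acc with
  | nil => simp [numberlistGen, lin]
  | cons x rest ih =>
    simp only [numberlistGen, lin]
    by_cases hx : acc + x > limit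
    · rw [if_pos hx, if_pos (by omega : x > limit - acc)]
      simp
    · rw [if_neg hx, if_neg (by omega : ¬ x > limit - acc)]
      have : limit - acc - x = limit - (acc + x) := by ring
      rw [this, List.take_succ_cons, ih]

-- ===== VERDICT (by name: the statement is the Claim_ definition above) =====
theorem numberlist_spec : Claim_equal_numberlist := by
  intro nums limit _
  unfold Spec_numberlist numberlist numberlist_alt
  rw [gen_eq_take_lin nums limit 0]
  by_cases hn : nums.isEmpty
  · rw [List.isEmpty_iff] at hn
    subst hn; simp [lin]
  · simp only [Bool.not_eq_true] at hn
    rw [goB_eq_lin nums.length nums limit le_rfl]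
    simp [hn]
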